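-- pv_equiv track=rewrite | github.com/pypi-data/pypi-mirror-401 | packages/basicthainlp/basicthainlp-0.5.7-py3-none-any.whl/basicthainlp/tokenIdentification/TokenIden.py | toTokenList
-- ===== SOURCE A (Python) =====
-- def toTokenList(text,tokenIdenList):
--     textTokenList = []
--     tagList = []
--     preTag = ''
--     tokenStr = ''
--     for c, t in zip(text, tokenIdenList):
--         if t[0] == 'B' or t[0] == 'O' or preTag != t[2:]:
--             if tokenStr != '':
--                 textTokenList.append(tokenStr)
--                 tagList.append(preTag)
--             tokenStr = c
--         else:
--             tokenStr += c
--         preTag = t[2:]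
--     if tokenStr != '':
--         textTokenList.append(tokenStr)
--         tagList.append(preTag)
--     return textTokenList,tagList
-- ===== SOURCE B (Python) =====
-- def toTokenList(text, tokenIdenList):
--     # Pass 1: record the start index and label (t[2:]) of every token.
--     starts = []
--     prev = None
--     for i, (c, t) in enumerate(zip(text, tokenIdenList)):
--         lab = t[2:]
--         if t[0] == 'B' or t[0] == 'O' or lab != prev:
--             starts.append((i, lab))
--         prev = lab
--     # Pass 2: slice the text between consecutive starts.
--     n = min(len(text), len(tokenIdenList))
--     tokens = []
--     tags = []
--     for j, (s, lab) in enumerate(starts):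
--         e = starts[j + 1][0] if j + 1 < len(starts) else n
--         tokens.append(text[s:e])
--         tags.append(lab)
--     return tokens, tags
-- ===== Notes on version B (the rewrite author's own statement) =====
-- stated objective: alternative
-- what changed: Replaces A's single accumulator loop (growing a token string and flushing on boundaries) by two passes: first record every token's start index and label, then slice the text between consecutive starts.
import Mathlib
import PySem

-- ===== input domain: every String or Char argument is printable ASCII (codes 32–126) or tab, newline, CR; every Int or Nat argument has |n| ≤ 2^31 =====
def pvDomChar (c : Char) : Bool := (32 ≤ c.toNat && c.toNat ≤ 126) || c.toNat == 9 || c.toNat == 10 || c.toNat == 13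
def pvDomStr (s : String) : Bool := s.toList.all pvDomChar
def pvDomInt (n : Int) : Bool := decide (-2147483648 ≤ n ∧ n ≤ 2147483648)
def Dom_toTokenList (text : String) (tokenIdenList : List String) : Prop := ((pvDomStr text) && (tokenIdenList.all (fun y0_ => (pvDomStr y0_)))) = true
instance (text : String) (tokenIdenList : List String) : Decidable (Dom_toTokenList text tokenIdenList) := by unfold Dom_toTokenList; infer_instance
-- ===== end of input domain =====

-- B replaces A's single accumulator loop by two passes: record every token's start
-- index and label, then slice the text between consecutive starts (objective: alternative).

-- ===== PORT A =====
-- strings are carried as List Char (PySem.Chars representation); output rebuilt with String.ofList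
def toTokenListLoop (ps : List (Char × List Char)) (textTokenList tagList : List (List Char))
    (preTag tokenStr : List Char) : List (List Char) × List (List Char) :=
  match ps with
  | [] =>
      if tokenStr ≠ [] then (textTokenList ++ [tokenStr], tagList ++ [preTag])
      else (textTokenList, tagList)
  | (c, t) :: rest =>
      if PySem.List.pyGet? t 0 = some 'B' ∨ PySem.List.pyGet? t 0 = some 'O' ∨
          preTag ≠ PySem.List.slice t (some 2) none then
        if tokenStr ≠ [] then
          toTokenListLoop rest (textTokenList ++ [tokenStr]) (tagList ++ [preTag])
            (PySem.List.slice t (some 2) none) [c]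
        else
          toTokenListLoop rest textTokenList tagList (PySem.List.slice t (some 2) none) [c]
      else
        toTokenListLoop rest textTokenList tagList (PySem.List.slice t (some 2) none) (tokenStr ++ [c])

def toTokenList (text : String) (tokenIdenList : List String) : List String × List String :=
  ((toTokenListLoop (text.toList.zip (tokenIdenList.map String.toList)) [] [] [] []).1.map String.ofList,
   (toTokenListLoop (text.toList.zip (tokenIdenList.map String.toList)) [] [] [] []).2.map String.ofList)

-- ===== PORT B =====
-- pass 1: start index and label of every token
def altStarts (ps : List (Char × List Char)) (i : Nat) (prev : Option (List Char)) :
    List (Nat × List Char) :=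
  match ps with
  | [] => []
  | (_, t) :: rest =>
      let lab := PySem.List.slice t (some 2) none
      if PySem.List.pyGet? t 0 = some 'B' ∨ PySem.List.pyGet? t 0 = some 'O' ∨
          some lab ≠ prev then
        (i, lab) :: altStarts rest (i + 1) (some lab)
      else
        altStarts rest (i + 1) (some lab)

-- pass 2: slice the text between consecutive starts
def altBuild (cs : List Char) (n : Nat) (starts : List (Nat × List Char)) :
    List (List Char) × List (List Char) :=
  match starts with
  | [] => ([], [])
  | (s, lab) :: rest =>
      let e : Nat := match rest with | [] => n | (s', _) :: _ => s'
      let r := altBuild cs n rest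
      (PySem.List.slice cs (some (s : Int)) (some (e : Int)) :: r.1, lab :: r.2)

def toTokenList_alt (text : String) (tokenIdenList : List String) : List String × List String :=
  ((altBuild text.toList (min text.toList.length tokenIdenList.length)
      (altStarts (text.toList.zip (tokenIdenList.map String.toList)) 0 none)).1.map String.ofList,
   (altBuild text.toList (min text.toList.length tokenIdenList.length)
      (altStarts (text.toList.zip (tokenIdenList.map String.toList)) 0 none)).2.map String.ofList)

-- ===== PRECONDITION & SPEC =====
-- Pre_ excludes inputs where some tag string paired with a character is empty: there Python A
-- (and Python B) raise IndexError on t[0].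
def Pre_toTokenList (text : String) (tokenIdenList : List String) : Prop :=
  ∀ p ∈ text.toList.zip tokenIdenList, p.2 ≠ ""
instance (text : String) (tokenIdenList : List String) : Decidable (Pre_toTokenList text tokenIdenList) := by unfold Pre_toTokenList; infer_instance

def pvWitness_toTokenList : String × List String := ("abc", ["B-x", "I-x", "O"])

def Spec_toTokenList (text : String) (tokenIdenList : List String) (out : List String × List String) : Prop := out = toTokenList_alt text tokenIdenList
instance (text : String) (tokenIdenList : List String) (out : List String × List String) : Decidable (Spec_toTokenList text tokenIdenList out) := by unfold Spec_toTokenList; infer_instance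

-- ===== CLAIM (what is proved, stated in full; the proofs are below) =====
def Claim_equal_toTokenList : Prop := ∀ (text : String) (tokenIdenList : List String), Dom_toTokenList text tokenIdenList → Pre_toTokenList text tokenIdenList → Spec_toTokenList text tokenIdenList (toTokenList text tokenIdenList)

-- ===== LEMMAS AND PROOFS =====

-- reference "remaining output" function: what A's loop appends from state (preTag, tokenStr)
def pvG (ps : List (Char × List Char)) (preTag tok : List Char) : List (List Char) × List (List Char) :=
  match ps with
  | [] => if tok ≠ [] then ([tok], [preTag]) else ([], [])
  | (c, t) :: rest =>
      let lab := PySem.List.slice t (some 2) none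
      if PySem.List.pyGet? t 0 = some 'B' ∨ PySem.List.pyGet? t 0 = some 'O' ∨ preTag ≠ lab then
        if tok ≠ [] then
          let r := pvG rest lab [c]
          (tok :: r.1, preTag :: r.2)
        else pvG rest lab [c]
      else pvG rest lab (tok ++ [c])

lemma pvLoop_eq_pvG (ps : List (Char × List Char)) :
    ∀ toks tags preTag tok,
    toTokenListLoop ps toks tags preTag tok =
      (toks ++ (pvG ps preTag tok).1, tags ++ (pvG ps preTag tok).2) := by
  induction ps with
  | nil =>
      intro toks tags preTag tok
      simp only [toTokenListLoop, pvG]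
      split_ifs <;> simp
  | cons p rest ih =>
      obtain ⟨c, t⟩ := p
      intro toks tags preTag tok
      simp only [toTokenListLoop, pvG]
      split_ifs with h1 h2
      · rw [ih]; simp
      · rw [ih]
      · rw [ih]

lemma pvKey (cs : List Char) : ∀ (ps : List (Char × List Char)) (rem : List Char) (i s : Nat)
    (lab : List Char),
    s ≤ i →
    cs.drop i = ps.map Prod.fst ++ rem →
    (cs.drop s).take (i - s) ≠ [] →
    pvG ps lab ((cs.drop s).take (i - s)) =
      altBuild cs (i + ps.length) ((s, lab) :: altStarts ps i (some lab)) := by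
  intro ps
  induction ps with
  | nil =>
      intro rem i s lab hsi hdrop htok
      simp only [pvG, altStarts, altBuild, List.length_nil, Nat.add_zero]
      rw [if_pos htok, PySem.List.slice_natCast]
  | cons p rest ih =>
      obtain ⟨c, t⟩ := p
      intro rem i s lab hsi hdrop htok
      have hci : cs[i]? = some c := by
        have : (cs.drop i)[0]? = some c := by rw [hdrop]; simp
        simpa using this
      have hdrop' : cs.drop (i + 1) = rest.map Prod.fst ++ rem := by
        rw [← List.tail_drop, hdrop]; simp
      set lab' := PySem.List.slice t (some 2) none with hlab'
      have hcond : (PySem.List.pyGet? t 0 = some 'B' ∨ PySem.List.pyGet? t 0 = some 'O' ∨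
            some lab' ≠ some lab) ↔
          (PySem.List.pyGet? t 0 = some 'B' ∨ PySem.List.pyGet? t 0 = some 'O' ∨ lab ≠ lab') := by
        simp [ne_comm]
      have hnew : (cs.drop i).take 1 = [c] := by
        rw [hdrop]; simp
      have hlen : i + ((c, t) :: rest).length = (i + 1) + rest.length := by
        simp [Nat.add_comm, Nat.add_left_comm]
      by_cases hA : PySem.List.pyGet? t 0 = some 'B' ∨ PySem.List.pyGet? t 0 = some 'O' ∨ lab ≠ lab'
      · -- new token starts at i
        simp only [pvG, altStarts]
        rw [if_pos hA, if_pos htok, if_pos (hcond.mpr hA)]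
        have hrec := ih rem (i + 1) i lab' (by omega) hdrop'
          (by rw [Nat.add_sub_cancel_left, hnew]; simp)
        rw [Nat.add_sub_cancel_left, hnew] at hrec
        rw [hrec]
        simp only [altBuild, hlen, PySem.List.slice_natCast, ← hlab']
      · -- token continues
        have hlabeq : lab = lab' := by
          by_contra hne
          exact hA (Or.inr (Or.inr hne))
        simp only [pvG, altStarts]
        rw [if_neg hA, if_neg (fun h => hA (hcond.mp h))]
        have hext : (cs.drop s).take (i - s) ++ [c] = (cs.drop s).take ((i + 1) - s) := by
          have hidx : (cs.drop s)[i - s]? = some c := by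
            rw [List.getElem?_drop]
            rwa [show s + (i - s) = i by omega]
          rw [show (i + 1) - s = (i - s) + 1 by omega, List.take_add_one, hidx]
          rfl
        have hrec := ih rem (i + 1) s lab' (by omega) hdrop'
          (by rw [← hext]; simp)
        rw [hext, hlabeq, hrec]
        rw [hlen]

lemma pvZipDecomp (cs : List Char) : ∀ (ts : List (List Char)),
    cs = (cs.zip ts).map Prod.fst ++ cs.drop (cs.zip ts).length := by
  induction cs with
  | nil => intro ts; simp
  | cons c cs ih =>
      intro ts
      cases ts with
      | nil => simp
      | cons t ts => simpa using ih ts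

theorem toTokenList_spec : Claim_equal_toTokenList := by
  intro text tokenIdenList _ _
  unfold Spec_toTokenList toTokenList toTokenList_alt
  set cs := text.toList with hcs
  set ts := tokenIdenList.map String.toList with hts
  have hmin : min cs.length tokenIdenList.length = (cs.zip ts).length := by
    simp [hts]
  rw [hmin]
  cases hz : cs.zip ts with
  | nil =>
      rw [pvLoop_eq_pvG]
      simp [pvG, altStarts, altBuild]
  | cons p rest =>
      obtain ⟨c, t⟩ := p
      have hdecomp := pvZipDecomp cs ts
      rw [hz] at hdecomp
      have hdrop1 : cs.drop 1 = rest.map Prod.fst ++ cs.drop ((c, t) :: rest).length := by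
        conv_lhs => rw [hdecomp]
        simp
      have htake1 : cs.take 1 = [c] := by
        conv_lhs => rw [hdecomp]; simp
      set lab' := PySem.List.slice t (some 2) none with hlab'
      have hkey := pvKey cs rest (cs.drop ((c, t) :: rest).length) 1 0 lab'
        (by omega) (by simpa using hdrop1)
        (by simp only [List.drop_zero, Nat.sub_zero]; rw [htake1]; simp)
      simp only [List.drop_zero, Nat.sub_zero] at hkey
      rw [htake1] at hkey
      -- A side: one step of pvG
      rw [pvLoop_eq_pvG]
      have hAstep : pvG ((c, t) :: rest) [] [] = pvG rest lab' [c] := by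
        simp only [pvG]
        split_ifs with h1 h2
        · simp at h2
        · rfl
        · rfl
      -- B side: first start is always recorded (some ≠ none)
      have hBstep : altStarts ((c, t) :: rest) 0 none =
          (0, lab') :: altStarts rest 1 (some lab') := by
        simp only [altStarts]
        rw [if_pos (Or.inr (Or.inr (by simp)))]
      rw [hAstep, hBstep, hkey]
      simp [Nat.add_comm]
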